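-- pv_equiv track=rewrite | github.com/VladimirShitov/nafig | nafig/utils.py | label_consecutive_bins
-- ===== SOURCE A (Python) =====
-- def label_consecutive_bins(binned_features) -> list[int]:
--     """Split bins into groups of consecutive not empty bins. Integers in the array represent the group number, and -1 represent empty bins.
--
--     Parameters
--     ----------
--     binned_features : list[list]
--         List of lists with features in each bin
--
--     Returns
--     -------
--     groups : list
--         List with group numbers for each bin
--
--     Examples
--     --------
--     >>> label_consecutive_bins([[1, 2, 3], [4, 5], [], [6, 7, 8]])
--     [0, 0, -1, 1]
--     >>> label_consecutive_bins([[1, 2, 3], [4, 5], [], [6, 7, 8], [9, 10]])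
--     [0, 0, -1, 1, 1]
--     >>> label_consecutive_bins([["a"], ["b"], ["c"], [], ["a"], ["a", "b"], [], ["d"], [], []])
--     [0, 0, 0, -1, 1, 1, -1, 2, -1, -1]
--     """
--     groups = []
--     current_group = 0
--
--     for features in binned_features:
--         if features:
--             groups.append(current_group)
--         else:
--             groups.append(-1)
--             current_group += 1
--
--     return groups
-- ===== SOURCE B (Python) =====
-- def label_consecutive_bins(binned_features) -> list[int]:
--     """Run-length approach: repeatedly find the maximal run of non-empty bins
--     starting at i, emit it as one replicated block [g]*(run length), then emit
--     a -1 for the empty bin that ended it and move past it."""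
--     out = []
--     g = 0
--     i = 0
--     n = len(binned_features)
--     while True:
--         j = i
--         while j < n and binned_features[j]:
--             j += 1
--         out += [g] * (j - i)
--         if j == n:
--             return out
--         out.append(-1)
--         i = j + 1
--         g += 1
-- ===== Notes on version B (the rewrite author's own statement) =====
-- stated objective: alternative
-- what changed: Replaces A's per-element loop (conditionally appending the running counter or -1 for each bin) with a run-length algorithm: scan for each maximal run of non-empty bins, emit it as one replicated block [g]*len(run), emit -1 for the empty bin ending it, and advance past it.
import Mathlib
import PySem

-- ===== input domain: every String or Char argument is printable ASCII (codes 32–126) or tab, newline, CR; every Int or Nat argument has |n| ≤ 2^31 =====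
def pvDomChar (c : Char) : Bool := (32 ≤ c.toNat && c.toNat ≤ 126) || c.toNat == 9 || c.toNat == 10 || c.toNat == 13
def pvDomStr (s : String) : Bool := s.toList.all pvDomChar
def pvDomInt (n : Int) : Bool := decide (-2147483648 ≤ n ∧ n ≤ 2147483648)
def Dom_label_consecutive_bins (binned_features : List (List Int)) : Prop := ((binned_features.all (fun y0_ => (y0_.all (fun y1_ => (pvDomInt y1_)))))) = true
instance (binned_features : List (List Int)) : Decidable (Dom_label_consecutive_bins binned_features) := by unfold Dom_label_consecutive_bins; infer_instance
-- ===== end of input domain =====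

-- B replaces A's per-element counter loop with a run-length algorithm (emit each maximal
-- non-empty run as one replicated block, -1 for the empty bin ending it); same values.

-- ===== PORT A =====
-- A's loop: state (groups, current_group); append current_group for non-empty bins,
-- append -1 and bump the counter for empty ones.
def label_consecutive_bins (binned_features : List (List Int)) : List Int :=
  (binned_features.foldl
    (fun (st : List Int × Int) features =>
      if features ≠ [] then (st.1 ++ [st.2], st.2)
      else (st.1 ++ [-1], st.2 + 1))
    ([], 0)).1

-- ===== PORT B =====
-- Source B's inner while loop: length of the leading run of non-empty bins
def pvRun : List (List Int) → Nat
  | [] => 0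
  | f :: r => if f ≠ [] then pvRun r + 1 else 0

theorem pvRun_le (bf : List (List Int)) : pvRun bf ≤ bf.length := by
  induction bf with
  | nil => simp [pvRun]
  | cons f r ih => by_cases h : f = [] <;> simp [pvRun, h] <;> omega

-- Source B's outer while-true loop on the remaining suffix (the index i becomes 'drop')
def pvGo (bf : List (List Int)) (g : Int) : List Int :=
  let k := pvRun bf
  if h : k = bf.length then List.replicate k g
  else List.replicate k g ++ [-1] ++ pvGo (bf.drop (k + 1)) (g + 1)
termination_by bf.length
decreasing_by
  have := pvRun_le bf
  simp only [List.length_drop]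
  omega

def label_consecutive_bins_alt (binned_features : List (List Int)) : List Int :=
  pvGo binned_features 0

-- ===== PRECONDITION & SPEC =====
def Spec_label_consecutive_bins (binned_features : List (List Int)) (out : List Int) : Prop := out = label_consecutive_bins_alt binned_features
instance (binned_features : List (List Int)) (out : List Int) : Decidable (Spec_label_consecutive_bins binned_features out) := by unfold Spec_label_consecutive_bins; infer_instance

-- ===== CLAIM (what is proved, stated in full; the proofs are below) =====
def Claim_equal_label_consecutive_bins : Prop := ∀ (binned_features : List (List Int)), Dom_label_consecutive_bins binned_features → Spec_label_consecutive_bins binned_features (label_consecutive_bins binned_features)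

-- ===== LEMMAS AND PROOFS =====
theorem pvGo_cons_empty (r : List (List Int)) (g : Int) :
    pvGo ([] :: r) g = -1 :: pvGo r (g + 1) := by
  rw [pvGo]
  simp [pvRun]

theorem pvGo_cons_nonempty (f : List Int) (hf : f ≠ []) (r : List (List Int)) (g : Int) :
    pvGo (f :: r) g = g :: pvGo r g := by
  rw [pvGo]
  conv_rhs => rw [pvGo]
  have hk : pvRun (f :: r) = pvRun r + 1 := by simp [pvRun, hf]
  by_cases h : pvRun r = r.length
  · have h2 : pvRun (f :: r) = (f :: r).length := by simp [hk, h]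
    simp [hk, h2, List.replicate_succ, h]
  · have h' : ¬ (pvRun (f :: r) = (f :: r).length) := by simp [hk]; omega
    simp [hk, h', List.replicate_succ, List.drop_succ_cons, h]

theorem pv_loop_eq (bf : List (List Int)) : ∀ (acc : List Int) (g : Int),
    (bf.foldl
      (fun (st : List Int × Int) features =>
        if features ≠ [] then (st.1 ++ [st.2], st.2)
        else (st.1 ++ [-1], st.2 + 1))
      (acc, g)).1
    = acc ++ pvGo bf g := by
  induction bf with
  | nil => intro acc g; simp [pvGo, pvRun]
  | cons f r ih =>
    intro acc g
    rw [List.foldl_cons]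
    by_cases h : f = []
    · rw [if_neg (by simp [h]), ih, h, pvGo_cons_empty]
      simp
    · rw [if_pos h, ih, pvGo_cons_nonempty f h]
      simp

-- ===== VERDICT (by name: the statement is the Claim_ definition above) =====
theorem label_consecutive_bins_spec : Claim_equal_label_consecutive_bins := by
  intro bf _
  unfold Spec_label_consecutive_bins label_consecutive_bins label_consecutive_bins_alt
  simpa using pv_loop_eq bf [] 0
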